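-- pv_equiv track=rewrite | github.com/bradenwatkins/advent-of-code | 2019/day10.py | clear_sight
-- ===== SOURCE A (Python) =====
-- def clear_sight(field, x, y, dx, dy):
--     blocked = False
--     y += dy
--     x += dx
--     while x >= 0 and y >= 0 and y < len(field) and x < len(field[y]):
--         if field[y][x] == '#' and not blocked:
--             blocked = True
--         elif blocked:
--             field[y][x] = '.'
--         y += dy
--         x += dx
--     return field
-- ===== SOURCE B (Python) =====
-- def clear_sight(field, x, y, dx, dy):
--     # Collect the whole ray of in-bounds coordinates, one step out from (x, y).
--     ray = []
--     cx, cy = x + dx, y + dy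
--     while cx >= 0 and cy >= 0 and cy < len(field) and cx < len(field[cy]):
--         ray.append((cx, cy))
--         cx += dx
--         cy += dy
--     # The set of coordinates strictly behind the first asteroid on the ray.
--     to_clear = set()
--     for i, (px, py) in enumerate(ray):
--         if field[py][px] == '#':
--             to_clear = set(ray[i + 1:])
--             break
--     # Rebuild the whole grid, blanking exactly those coordinates.
--     field[:] = [[('.' if (px, py) in to_clear else cell)
--                  for px, cell in enumerate(row)]
--                 for py, row in enumerate(field)]
--     return field
-- ===== Notes on version B (the rewrite author's own statement) =====
-- stated objective: alternative
-- what changed: Instead of walking the ray while mutating cells behind a 'blocked' flag, B first materialises the ray as an explicit list of coordinates, takes the suffix after the first '#' as a set, and then rebuilds the entire grid in one pass with a membership test against that set.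
import Mathlib
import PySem

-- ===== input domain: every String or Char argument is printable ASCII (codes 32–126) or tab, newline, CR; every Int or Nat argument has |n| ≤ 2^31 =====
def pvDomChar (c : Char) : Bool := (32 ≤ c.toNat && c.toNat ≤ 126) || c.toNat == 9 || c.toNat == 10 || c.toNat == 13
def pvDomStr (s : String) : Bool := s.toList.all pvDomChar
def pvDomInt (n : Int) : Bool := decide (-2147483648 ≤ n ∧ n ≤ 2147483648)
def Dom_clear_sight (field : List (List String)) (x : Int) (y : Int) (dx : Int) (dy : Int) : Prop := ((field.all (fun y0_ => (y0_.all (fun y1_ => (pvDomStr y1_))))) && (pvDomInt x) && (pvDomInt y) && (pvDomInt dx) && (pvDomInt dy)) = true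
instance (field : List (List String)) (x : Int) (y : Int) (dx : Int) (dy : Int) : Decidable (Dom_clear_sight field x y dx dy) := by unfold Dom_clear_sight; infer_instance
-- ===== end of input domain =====

-- B replaces A's walk-and-mutate loop by a different data flow: it materialises the
-- ray as an explicit coordinate list, takes the suffix after the first '#' as a set,
-- and rebuilds the whole grid with a membership test. Both Pythons mutate `field` in
-- place; the equivalence proved here is about the returned value.

-- Shared primitives: Python's bounds test
-- `x >= 0 and y >= 0 and y < len(field) and x < len(field[y])`,
-- the cell read `field[y][x]`, the cell write `field[y][x] = '.'` (the getD/toNat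
-- accesses are only ever used under the bounds test, where they are exact), and a
-- fuel bound large enough for every terminating run admitted by Pre_ (each in-bounds
-- step moves x or y monotonically inside [0, width) resp. [0, height)).
def pvInb (field : List (List String)) (x : Int) (y : Int) : Bool :=
  decide (0 ≤ x) && decide (0 ≤ y) && decide (y < (field.length : Int)) &&
    decide (x < ((field.getD y.toNat []).length : Int))
def pvCell (field : List (List String)) (x : Int) (y : Int) : String :=
  (field.getD y.toNat []).getD x.toNat ""
def pvSet (field : List (List String)) (x : Int) (y : Int) : List (List String) :=
  field.set y.toNat ((field.getD y.toNat []).set x.toNat ".")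
def pvFuel (field : List (List String)) : Nat :=
  field.length + (field.map List.length).foldl max 0 + 2

-- ===== PORT A =====
-- A's while loop, step for step, with the `blocked` flag as loop state.
def csLoopA (dx dy : Int) : Nat → List (List String) → Int → Int → Bool → List (List String)
  | 0, field, _, _, _ => field
  | f + 1, field, x, y, blocked =>
    if pvInb field x y then
      if pvCell field x y = "#" ∧ blocked = false then
        csLoopA dx dy f field (x + dx) (y + dy) true
      else if blocked then
        csLoopA dx dy f (pvSet field x y) (x + dx) (y + dy) blocked
      else
        csLoopA dx dy f field (x + dx) (y + dy) blocked
    else field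

def clear_sight (field : List (List String)) (x : Int) (y : Int) (dx : Int) (dy : Int) : List (List String) :=
  csLoopA dx dy (pvFuel field) field (x + dx) (y + dy) false

-- ===== PORT B =====
-- Source B's first while loop: collect the ray of in-bounds coordinates.
def csRay (dx dy : Int) : Nat → List (List String) → Int → Int → List (Int × Int)
  | 0, _, _, _ => []
  | f + 1, field, x, y =>
    if pvInb field x y then (x, y) :: csRay dx dy f field (x + dx) (y + dy) else []

-- Source B's for loop over the ray: the suffix after the first '#', as a set.
def csToClear (field : List (List String)) : List (Int × Int) → List (Int × Int)
  | [] => []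
  | p :: rest =>
    if pvCell field p.1 p.2 = "#" then PySem.Set.ofList rest else csToClear field rest

-- Source B's nested comprehension: rebuild the grid, blanking the listed coordinates.
def csRebuild (field : List (List String)) (toClear : List (Int × Int)) : List (List String) :=
  (PySem.List.enumerate field 0).map (fun pr =>
    (PySem.List.enumerate pr.2 0).map (fun qc =>
      if (qc.1, pr.1) ∈ toClear then "." else qc.2))

def clear_sight_alt (field : List (List String)) (x : Int) (y : Int) (dx : Int) (dy : Int) : List (List String) :=
  csRebuild field (csToClear field (csRay dx dy (pvFuel field) field (x + dx) (y + dy)))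

-- ===== PRECONDITION & SPEC =====
-- Pre_ excludes exactly the inputs on which Python A never returns: with
-- dx = dy = 0 and the first step in bounds the while loop repeats the same cell
-- forever (B diverges there too); A returns on every other input.
def Pre_clear_sight (field : List (List String)) (x : Int) (y : Int) (dx : Int) (dy : Int) : Prop :=
  ¬ (dx = 0 ∧ dy = 0 ∧ 0 ≤ x + dx ∧ 0 ≤ y + dy ∧
      y + dy < (field.length : Int) ∧ x + dx < ((field.getD (y + dy).toNat []).length : Int))
instance (field : List (List String)) (x : Int) (y : Int) (dx : Int) (dy : Int) : Decidable (Pre_clear_sight field x y dx dy) := by unfold Pre_clear_sight; infer_instance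
def pvWitness_clear_sight : List (List String) × Int × Int × Int × Int := ([["#", "."], [".", "#"]], 0, 0, 1, 1)
def Spec_clear_sight (field : List (List String)) (x : Int) (y : Int) (dx : Int) (dy : Int) (out : List (List String)) : Prop := out = clear_sight_alt field x y dx dy
instance (field : List (List String)) (x : Int) (y : Int) (dx : Int) (dy : Int) (out : List (List String)) : Decidable (Spec_clear_sight field x y dx dy out) := by unfold Spec_clear_sight; infer_instance

-- ===== CLAIM (what is proved, stated in full; the proofs are below) =====
def Claim_equal_clear_sight : Prop := ∀ (field : List (List String)) (x : Int) (y : Int) (dx : Int) (dy : Int), Dom_clear_sight field x y dx dy → Pre_clear_sight field x y dx dy → Spec_clear_sight field x y dx dy (clear_sight field x y dx dy)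

-- ===== LEMMAS AND PROOFS =====

-- Rebuilding depends only on MEMBERSHIP in the clear-list.
theorem csRebuild_congr (field : List (List String)) (L L' : List (Int × Int))
    (h : ∀ p, p ∈ L ↔ p ∈ L') : csRebuild field L = csRebuild field L' := by
  unfold csRebuild
  congr 1; funext pr; congr 1; funext qc
  rw [if_congr (h _) rfl rfl]

-- Rebuilding with nothing to clear returns the grid unchanged.
theorem csRebuild_nil (field : List (List String)) : csRebuild field [] = field := by
  unfold csRebuild
  simp [PySem.List.map_snd_enumerate]

-- pvSet preserves the grid's shape.
theorem length_pvSet (field : List (List String)) (a b : Int) :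
    (pvSet field a b).length = field.length := by
  simp [pvSet]

theorem rowlen_pvSet (field : List (List String)) (a b : Int) (j : Nat) :
    ((pvSet field a b).getD j []).length = (field.getD j []).length := by
  unfold pvSet
  by_cases hj : j < field.length
  · rw [List.getD_eq_getElem _ _ (by simpa using hj), List.getD_eq_getElem _ _ hj,
      List.getElem_set]
    split_ifs with h
    · subst h
      rw [List.length_set, List.getD_eq_getElem _ _ hj]
    · rfl
  · rw [List.getD_eq_default _ _ (by simpa using Nat.le_of_not_lt hj),
      List.getD_eq_default _ _ (Nat.le_of_not_lt hj)]

theorem pvInb_pvSet (field : List (List String)) (a b x y : Int) :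
    pvInb (pvSet field a b) x y = pvInb field x y := by
  unfold pvInb
  rw [length_pvSet, rowlen_pvSet]

theorem csRay_pvSet (dx dy a b : Int) :
    ∀ (f : Nat) (field : List (List String)) (x y : Int),
      csRay dx dy f (pvSet field a b) x y = csRay dx dy f field x y := by
  intro f
  induction f with
  | zero => intro field x y; rfl
  | succ f ih =>
    intro field x y
    simp only [csRay, pvInb_pvSet, ih]

-- The key cell-level lemma: writing '.' at an in-bounds coordinate commutes with
-- the rebuild, turning into a cons on the clear-list.
theorem csRebuild_pvSet (field : List (List String)) (a b : Int) (L : List (Int × Int))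
    (ha : 0 ≤ a) (hb : 0 ≤ b) :
    csRebuild (pvSet field a b) L = csRebuild field ((a, b) :: L) := by
  unfold csRebuild pvSet
  apply List.ext_getElem
  · simp
  · intro i h1 h2
    have hi : i < field.length := by simpa using h1
    simp only [List.getElem_map, PySem.List.getElem_enumerate, List.getElem_set]
    by_cases hbi : b.toNat = i
    · subst hbi
      have hrow : field.getD b.toNat [] = field[b.toNat] := List.getD_eq_getElem _ _ hi
      simp only [hrow]
      apply List.ext_getElem
      · simp
      · intro k k1 k2
        simp only [List.getElem_map, PySem.List.getElem_enumerate, List.mem_cons, Int.zero_add]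
        by_cases hak : a.toNat = k
        · have hka : (k : Int) = a := by omega
          simp only [hak]
          simp
          intro h _
          exact absurd (h hka) (by omega)
        · have hka : ¬ ((k : Int) = a) := by omega
          simp [hak, hka]
    · simp only [if_neg hbi]
      apply List.ext_getElem
      · simp
      · intro k k1 k2
        simp only [List.getElem_map, PySem.List.getElem_enumerate, List.mem_cons, Int.zero_add]
        have hpa : ¬ ((k : Int), (i : Int)) = (a, b) := by
          intro h
          have : (i : Int) = b := congrArg Prod.snd h
          omega
        simp [hpa]

-- Once `blocked` is set, A's loop clears every cell of the remaining ray.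
theorem csLoopA_blocked (dx dy : Int) :
    ∀ (f : Nat) (field : List (List String)) (x y : Int),
      csLoopA dx dy f field x y true = csRebuild field (csRay dx dy f field x y) := by
  intro f
  induction f with
  | zero => intro field x y; exact (csRebuild_nil field).symm
  | succ f ih =>
    intro field x y
    simp only [csLoopA, csRay]
    by_cases h : pvInb field x y
    · have hb := h
      simp only [pvInb, Bool.and_eq_true, decide_eq_true_eq] at hb
      simp only [h, if_true, ih, csRay_pvSet,
        csRebuild_pvSet field x y _ hb.1.1.1 hb.1.1.2]
      simp
    · simp [h, csRebuild_nil]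

-- Before `blocked` is set, A's loop equals B's rebuild of the post-'#' suffix.
theorem csLoopA_unblocked (dx dy : Int) :
    ∀ (f : Nat) (field : List (List String)) (x y : Int),
      csLoopA dx dy f field x y false =
        csRebuild field (csToClear field (csRay dx dy f field x y)) := by
  intro f
  induction f with
  | zero => intro field x y; exact (csRebuild_nil field).symm
  | succ f ih =>
    intro field x y
    simp only [csLoopA, csRay]
    by_cases h : pvInb field x y
    · by_cases hc : pvCell field x y = "#"
      · simp only [h, if_true, hc]
        simp only [csToClear, hc, if_pos trivial]
        rw [csLoopA_blocked]
        exact csRebuild_congr _ _ _ (fun p =>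
          (PySem.Set.mem_ofList (xs := csRay dx dy f field (x + dx) (y + dy)) (y := p)).symm)
      · simp [h, hc, csToClear, ih]
    · simp [h, csToClear, csRebuild_nil]

-- ===== VERDICT (by name: the statement is the Claim_ definition above) =====
theorem clear_sight_spec : Claim_equal_clear_sight := by
  intro field x y dx dy _ _
  unfold Spec_clear_sight clear_sight clear_sight_alt
  exact csLoopA_unblocked dx dy (pvFuel field) field (x + dx) (y + dy)
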